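-- pv_equiv track=rewrite | github.com/zlsnb/zls-python | 赵老师学习指南/src/wtfexcel/baseop_excel.py | indexChange
-- ===== SOURCE A (Python) =====
-- def indexChange(row, column):
--     if not isinstance(row, int) or not isinstance(column, int):
--         return
--     indexRes = ""
--     while column > 25:
--         indexRes = indexRes + chr(column % 26 + ord('A') - 1)
--         column = int(column / 26)
--     indexRes = indexRes + chr(column % 26 + ord('A') - 1)
--     return indexRes[::-1] + str(row)
-- ===== SOURCE B (Python) =====
-- def indexChange(row, column):
--     if not isinstance(row, int) or not isinstance(column, int):
--         return
--     def digits(c):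
--         d = c % 26
--         return digits(int(c / 26)) + [d] if c > 25 else [d]
--     return ''.join(chr(d + 64) for d in digits(column)) + str(row)
-- ===== Notes on version B (the rewrite author's own statement) =====
-- stated objective: alternative
-- what changed: Replaces A's while-loop that concatenates letters least-significant-first into a string and then reverses it by a two-stage decomposition: a recursive helper collects the integer base-26 digits most-significant-first, and the letters are produced by a single map/join over that digit list, with no reversal and no string accumulator.
import Mathlib
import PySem

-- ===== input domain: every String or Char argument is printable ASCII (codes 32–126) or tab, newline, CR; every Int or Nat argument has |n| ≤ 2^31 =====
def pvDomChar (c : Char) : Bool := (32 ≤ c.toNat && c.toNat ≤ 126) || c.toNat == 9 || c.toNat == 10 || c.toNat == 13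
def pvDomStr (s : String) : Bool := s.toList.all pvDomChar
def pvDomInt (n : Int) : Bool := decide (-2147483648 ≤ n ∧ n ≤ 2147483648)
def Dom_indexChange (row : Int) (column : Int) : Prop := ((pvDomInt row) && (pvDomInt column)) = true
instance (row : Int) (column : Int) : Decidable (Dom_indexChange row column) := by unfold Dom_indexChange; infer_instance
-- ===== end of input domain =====

-- ===== PORT A =====
-- B replaces A's LSB-first string accumulation + reversal by a recursive integer-digit collector plus one map; return values proved equal.
-- chr(column % 26 + ord('A') - 1): Python % has the divisor's sign, so column % 26 ∈ [0,26) and chr never raises.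
def pyChr26 (c : Int) : Char := Char.ofNat (PySem.Int.mod c 26 + 64).toNat

-- the while-loop of A: accumulates indexRes; 'int(column / 26)' truncates toward zero, which for the
-- only values it is applied to (column > 25, so positive) equals floor division PySem.Int.floordiv.
def aLoop (column : Int) (indexRes : List Char) : List Char :=
  if column > 25 then
    aLoop (PySem.Int.floordiv column 26) (indexRes ++ [pyChr26 column])
  else
    indexRes ++ [pyChr26 column]
termination_by column.toNat
decreasing_by
  have he : PySem.Int.floordiv column 26 = column / 26 :=
    PySem.Int.floordiv_eq_ediv_of_pos (by omega)
  rw [he]; omega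

-- the guard 'not isinstance(row, int) or not isinstance(column, int)' never fires for Int arguments
def indexChange (row : Int) (column : Int) : Option String :=
  some (String.ofList ((aLoop column []).reverse ++ (PySem.Int.toStr row).toList))

-- ===== PORT B =====
-- digits(c): the base-26 digit values d = c % 26, most-significant-first ('int(c / 26)' = floordiv since c > 25 there)
def bDigits (c : Int) : List Int :=
  if c > 25 then
    bDigits (PySem.Int.floordiv c 26) ++ [PySem.Int.mod c 26]
  else
    [PySem.Int.mod c 26]
termination_by c.toNat
decreasing_by
  have he : PySem.Int.floordiv c 26 = c / 26 :=
    PySem.Int.floordiv_eq_ediv_of_pos (by omega)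
  rw [he]; omega

-- ''.join(chr(d + 64) for d in digits(column)) + str(row)
def indexChange_alt (row : Int) (column : Int) : Option String :=
  some (String.ofList ((bDigits column).map (fun d => Char.ofNat (d + 64).toNat)
        ++ (PySem.Int.toStr row).toList))

-- ===== PRECONDITION & SPEC =====
def Spec_indexChange (row : Int) (column : Int) (out : Option String) : Prop := out = indexChange_alt row column
instance (row : Int) (column : Int) (out : Option String) : Decidable (Spec_indexChange row column out) := by unfold Spec_indexChange; infer_instance

-- ===== CLAIM (what is proved, stated in full; the proofs are below) =====
def Claim_equal_indexChange : Prop := ∀ (row : Int) (column : Int), Dom_indexChange row column → Spec_indexChange row column (indexChange row column)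

-- ===== LEMMAS AND PROOFS =====
lemma aLoop_eq_bDigits (column : Int) (acc : List Char) :
    aLoop column acc =
      acc ++ ((bDigits column).map (fun d => Char.ofNat (d + 64).toNat)).reverse := by
  fun_induction aLoop column acc with
  | case1 c acc h ih =>
      rw [bDigits, if_pos h, ih]
      simp [pyChr26]
  | case2 c acc h =>
      rw [bDigits, if_neg h]
      simp [pyChr26]

-- ===== VERDICT (by name: the statement is the Claim_ definition above) =====
theorem indexChange_spec : Claim_equal_indexChange := by
  intro row column _
  unfold Spec_indexChange indexChange indexChange_alt
  rw [aLoop_eq_bDigits]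
  simp
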